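-- pv_equiv track=rewrite | github.com/bluesky0960/Sentence_similarity | 2주차_문장_유사도_검사/sync_test2.py | getTrigram
-- ===== SOURCE A (Python) =====
-- def getTrigram(read1, read2):
--
--     dic = {}
--     dic2 = {}
--
--     dic_length = 0
--     dic2_length = 0
--
--     for i in range(len(read1)):
--         if(i+2 >= len(read1)):
--             break
--         else:
--             dic[read1[i]+read1[i+1]+read1[i+2]] = 0
--             dic_length += 1
--
--     for i in range(len(read2)):
--         if(i+2>=len(read2)):
--             break
--         else:
--             if (read2[i]+read2[i+1]+read2[i+2]) in dic.keys():
--                 dic[read2[i]+read2[i+1]+read2[i+2]] += 1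
--             dic2_length += 1
--
--     short_length = getShortLength(dic_length, dic2_length)
--
--     return dic, short_length
--
-- def getShortLength(len1, len2):
--
--     short_length = 0
--
--     if(len1>=len2):
--         short_length = len2
--     else:
--         short_length = len1
--
--     return short_length
-- ===== SOURCE B (Python) =====
-- def getTrigram(read1, read2):
--     # Count every trigram occurrence of read2 once, then build the result
--     # dict in one comprehension over read1's trigram positions.
--     n1 = max(len(read1) - 2, 0)
--     n2 = max(len(read2) - 2, 0)
--     c2 = {}
--     for i in range(n2):
--         t = read2[i] + read2[i + 1] + read2[i + 2]
--         c2[t] = c2.get(t, 0) + 1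
--     dic = {read1[i] + read1[i + 1] + read1[i + 2]:
--            c2.get(read1[i] + read1[i + 1] + read1[i + 2], 0)
--            for i in range(n1)}
--     return dic, min(n1, n2)
-- ===== Notes on version B (the rewrite author's own statement) =====
-- stated objective: idiomatic
-- what changed: Replaces the membership-guarded increment loop and incremental length counters with one totals Counter-style pass over read2 followed by a single dict comprehension over read1's trigrams, and computes short_length in closed form as min(max(len1-2,0),max(len2-2,0)).
import Mathlib
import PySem

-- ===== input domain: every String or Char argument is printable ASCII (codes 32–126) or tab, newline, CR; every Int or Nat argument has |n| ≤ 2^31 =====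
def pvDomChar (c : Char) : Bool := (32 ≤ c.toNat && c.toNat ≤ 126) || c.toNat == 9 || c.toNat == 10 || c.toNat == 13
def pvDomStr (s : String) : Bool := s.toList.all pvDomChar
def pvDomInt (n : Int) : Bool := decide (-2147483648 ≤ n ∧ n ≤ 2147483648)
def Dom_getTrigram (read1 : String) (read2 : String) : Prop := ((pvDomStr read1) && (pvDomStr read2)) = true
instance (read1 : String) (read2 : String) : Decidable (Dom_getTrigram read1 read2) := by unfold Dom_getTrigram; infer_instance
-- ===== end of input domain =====

-- B replaces A's membership-guarded increment loop with one total count of read2's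
-- trigrams followed by a single comprehension over read1's trigrams (idiomatic, same cost).


-- ===== PORT A =====
-- read[i]+read[i+1]+read[i+2]; both programs only evaluate it with i+2 < length,
-- so the ' ' defaults are never read and this is exact there.
def pyTri (cs : List Char) (i : Nat) : String :=
  String.ofList [cs.getD i ' ', cs.getD (i + 1) ' ', cs.getD (i + 2) ' ']

def getShortLength (len1 : Int) (len2 : Int) : Int :=
  if len1 ≥ len2 then len2 else len1

-- 'for i in range(len(read1)): if i+2 >= len(read1): break else: dic[...] = 0; dic_length += 1'
def loopA1 (cs : List Char) (i : Nat) (dic : PySem.Dict String Int) (dlen : Int) :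
    PySem.Dict String Int × Int :=
  if i < cs.length then
    if i + 2 ≥ cs.length then (dic, dlen)
    else loopA1 cs (i + 1) (dic.insert (pyTri cs i) 0) (dlen + 1)
  else (dic, dlen)
termination_by cs.length - i

-- second loop: 'if ... in dic.keys(): dic[...] += 1' and 'dic2_length += 1'
def loopA2 (cs : List Char) (i : Nat) (dic : PySem.Dict String Int) (dlen2 : Int) :
    PySem.Dict String Int × Int :=
  if i < cs.length then
    if i + 2 ≥ cs.length then (dic, dlen2)
    else
      loopA2 cs (i + 1)
        (if dic.contains (pyTri cs i) then dic.modify (pyTri cs i) 0 (· + 1) else dic)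
        (dlen2 + 1)
  else (dic, dlen2)
termination_by cs.length - i

def getTrigram (read1 : String) (read2 : String) : (List (String × Int)) × Int :=
  let p1 := loopA1 read1.toList 0 PySem.Dict.empty 0
  let p2 := loopA2 read2.toList 0 p1.1 0
  (p2.1.items, getShortLength p1.2 p2.2)

-- ===== PORT B =====
-- max(len(read)-2, 0) is Nat truncated subtraction; c2 is Source B's counting loop over
-- read2, dic is the comprehension over read1's trigram positions.
def getTrigram_alt (read1 : String) (read2 : String) : (List (String × Int)) × Int :=
  let cs1 := read1.toList
  let cs2 := read2.toList
  let n1 : Nat := cs1.length - 2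
  let n2 : Nat := cs2.length - 2
  let c2 := (List.range n2).foldl
    (fun d i => d.insert (pyTri cs2 i) (d.getD (pyTri cs2 i) 0 + 1)) PySem.Dict.empty
  let dic := (List.range n1).foldl
    (fun d i => d.insert (pyTri cs1 i) (c2.getD (pyTri cs1 i) 0)) PySem.Dict.empty
  (dic.items, min (n1 : Int) (n2 : Int))

-- ===== PRECONDITION & SPEC =====
def Spec_getTrigram (read1 : String) (read2 : String) (out : (List (String × Int)) × Int) : Prop := out = getTrigram_alt read1 read2
instance (read1 : String) (read2 : String) (out : (List (String × Int)) × Int) : Decidable (Spec_getTrigram read1 read2 out) := by unfold Spec_getTrigram; infer_instance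

-- ===== CLAIM (what is proved, stated in full; the proofs are below) =====
def Claim_equal_getTrigram : Prop := ∀ (read1 : String) (read2 : String), Dom_getTrigram read1 read2 → Spec_getTrigram read1 read2 (getTrigram read1 read2)

-- ===== LEMMAS AND PROOFS =====

-- A's first loop is the fold of 'insert trigram 0' over the positions i with i+2 < len,
-- and its length counter adds the number of those positions.
lemma loopA1_spec (cs : List Char) (i : Nat) (dic : PySem.Dict String Int) (dlen : Int) :
    loopA1 cs i dic dlen =
      ((List.range' i (cs.length - 2 - i)).foldl (fun d j => d.insert (pyTri cs j) 0) dic,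
       dlen + ((cs.length - 2 - i : Nat) : Int)) := by
  induction i, dic, dlen using loopA1.induct (cs := cs) with
  | case1 i dic dlen h1 h2 =>
    rw [loopA1]
    have : cs.length - 2 - i = 0 := by omega
    simp [h1, h2, this]
  | case2 i dic dlen h1 h2 ih =>
    rw [loopA1]
    have hk : cs.length - 2 - i = (cs.length - 2 - (i + 1)) + 1 := by omega
    simp only [h1, if_pos, if_neg h2, ih, hk, List.range'_succ, List.foldl_cons]
    rw [Prod.mk.injEq]
    exact ⟨rfl, by push_cast; ring⟩
  | case3 i dic dlen h1 =>
    rw [loopA1]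
    have : cs.length - 2 - i = 0 := by omega
    simp [h1, this]

-- same for A's second loop, with the conditional in-place increment.
lemma loopA2_spec (cs : List Char) (i : Nat) (dic : PySem.Dict String Int) (dlen2 : Int) :
    loopA2 cs i dic dlen2 =
      ((List.range' i (cs.length - 2 - i)).foldl
        (fun d j => if d.contains (pyTri cs j) then d.modify (pyTri cs j) 0 (· + 1) else d) dic,
       dlen2 + ((cs.length - 2 - i : Nat) : Int)) := by
  induction i, dic, dlen2 using loopA2.induct (cs := cs) with
  | case1 i dic dlen h1 h2 =>
    rw [loopA2]
    have : cs.length - 2 - i = 0 := by omega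
    simp [h1, h2, this]
  | case2 i dic dlen h1 h2 ih =>
    rw [loopA2]
    have hk : cs.length - 2 - i = (cs.length - 2 - (i + 1)) + 1 := by omega
    simp only [dite_eq_ite] at ih
    rw [if_pos h1, if_neg h2, ih, hk, List.range'_succ, List.foldl_cons]
    rw [Prod.mk.injEq]
    exact ⟨rfl, by push_cast; ring⟩
  | case3 i dic dlen h1 =>
    rw [loopA2]
    have : cs.length - 2 - i = 0 := by omega
    simp [h1, this]

-- a fold of inserts whose value depends only on the key: lookup afterwards.
lemma getD_foldl_insert_const (f : String → Int) (T : List String) :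
    ∀ (d : PySem.Dict String Int) (k : String),
    (T.foldl (fun d t => d.insert t (f t)) d).getD k 0 =
      if k ∈ T then f k else d.getD k 0 := by
  induction T with
  | nil => simp
  | cons t ts ih =>
    intro d k
    rw [List.foldl_cons, ih]
    by_cases hk : k ∈ ts
    · simp [hk]
    · simp only [hk, PySem.Dict.getD_insert, List.mem_cons]
      by_cases hkt : k = t <;> simp [hkt]

-- A's conditional-increment loop never changes the key list …
lemma keys_foldl_condmod (T : List String) :
    ∀ (d : PySem.Dict String Int),
    (T.foldl (fun d t => if d.contains t then d.modify t 0 (· + 1) else d) d).keys = d.keys := by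
  induction T with
  | nil => simp
  | cons t ts ih =>
    intro d
    rw [List.foldl_cons, ih]
    by_cases hc : d.contains t
    · simp [hc, PySem.Dict.keys_modify, PySem.Dict.keys_insert_of_contains]
    · simp [hc]

-- … and it adds, to each key already present, the number of its occurrences in T.
lemma getD_foldl_condmod (T : List String) :
    ∀ (d : PySem.Dict String Int) (k : String),
    (T.foldl (fun d t => if d.contains t then d.modify t 0 (· + 1) else d) d).getD k 0 =
      d.getD k 0 + (if d.contains k then (T.count k : Int) else 0) := by
  induction T with
  | nil => simp
  | cons t ts ih =>
    intro d k
    rw [List.foldl_cons, ih]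
    by_cases hct : d.contains t
    · simp only [hct, if_pos]
      by_cases hkt : k = t
      · subst hkt
        simp [PySem.Dict.contains_modify, hct]
        ring
      · simp [PySem.Dict.getD_modify, PySem.Dict.contains_modify, hkt, Ne.symm hkt]
    · simp only [hct, Bool.false_eq_true, if_false]
      by_cases hkt : k = t
      · subst hkt; simp [hct]
      · simp [Ne.symm hkt]

-- the central fact: A's two passes and B's count-then-comprehension build the same items list.
lemma items_eq (T1 T2 : List String) :
    (T2.foldl (fun d t => if d.contains t then d.modify t 0 (· + 1) else d)
       (T1.foldl (fun d t => d.insert t (0 : Int)) (PySem.Dict.empty : PySem.Dict String Int))).items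
  = (T1.foldl (fun d t => d.insert t
       ((T2.foldl (fun d t => d.insert t (d.getD t 0 + 1)) (PySem.Dict.empty : PySem.Dict String Int)).getD t 0))
       PySem.Dict.empty).items := by
  set D1 := T1.foldl (fun d t => d.insert t (0 : Int)) (PySem.Dict.empty : PySem.Dict String Int) with hD1
  set C2 := T2.foldl (fun d t => d.insert t (d.getD t 0 + 1)) (PySem.Dict.empty : PySem.Dict String Int) with hC2
  have hk1 : D1.keys = PySem.Set.ofList T1 := by
    rw [hD1, PySem.Dict.keys_foldl_insert, PySem.Dict.keys_empty, PySem.Set.update_nil_left]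
  have hn1 : D1.keys.Nodup := by rw [hk1]; exact PySem.Set.nodup_ofList T1
  have hkB : (T1.foldl (fun d t => d.insert t (C2.getD t 0)) PySem.Dict.empty).keys
      = PySem.Set.ofList T1 := by
    rw [PySem.Dict.keys_foldl_insert, PySem.Dict.keys_empty, PySem.Set.update_nil_left]
  have hnB : (T1.foldl (fun d t => d.insert t (C2.getD t 0)) PySem.Dict.empty).keys.Nodup := by
    rw [hkB]; exact PySem.Set.nodup_ofList T1
  have hk2 : (T2.foldl (fun d t => if d.contains t then d.modify t 0 (· + 1) else d) D1).keys
      = D1.keys := keys_foldl_condmod T2 D1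
  have hn2 : (T2.foldl (fun d t => if d.contains t then d.modify t 0 (· + 1) else d) D1).keys.Nodup := by
    rw [hk2]; exact hn1
  rw [PySem.Dict.items_eq_map_keys _ hn2 0, PySem.Dict.items_eq_map_keys _ hnB 0, hk2, hk1, hkB]
  apply List.map_congr_left
  intro k hkmem
  have hkT1 : k ∈ T1 := (PySem.Set.mem_ofList T1 k).mp hkmem
  have hc1 : D1.contains k = true := by
    rw [PySem.Dict.contains_iff_mem_keys, hk1, PySem.Set.mem_ofList]; exact hkT1
  rw [getD_foldl_condmod, hD1, getD_foldl_insert_const (fun _ => (0 : Int)) T1 PySem.Dict.empty k,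
      getD_foldl_insert_const (fun t => C2.getD t 0) T1 PySem.Dict.empty k,
      hC2, PySem.Dict.getD_foldl_insert_add_one]
  simp [← hD1, hc1, hkT1]

-- A's branchy getShortLength on the loop counters is B's closed-form min.
lemma shortlen_eq (a b : Nat) :
    getShortLength (0 + (a : Int)) (0 + (b : Int)) = min (a : Int) (b : Int) := by
  unfold getShortLength; split_ifs <;> omega

lemma getTrigram_eq_alt (r1 r2 : String) : getTrigram r1 r2 = getTrigram_alt r1 r2 := by
  unfold getTrigram getTrigram_alt
  simp only [loopA1_spec, loopA2_spec, Nat.sub_zero, ← List.range_eq_range']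
  have h := items_eq ((List.range (r1.toList.length - 2)).map (pyTri r1.toList))
                     ((List.range (r2.toList.length - 2)).map (pyTri r2.toList))
  simp only [List.foldl_map] at h
  rw [Prod.mk.injEq]
  exact ⟨h, shortlen_eq _ _⟩

-- ===== VERDICT (by name: the statement is the Claim_ definition above) =====
theorem getTrigram_spec : Claim_equal_getTrigram := by
  intro r1 r2 _
  exact getTrigram_eq_alt r1 r2
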